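-- pv_equiv track=rewrite | github.com/ARoennau/test-aoc-repo | python/13.py | min_left
-- ===== SOURCE A (Python) =====
-- def min_left(input, median, median_cost):
--     i = median - 1
--     min = median_cost
--     while i > input[0]:
--         current_cost = sum_distances_fuel(input, i)
--         if current_cost < min:
--             min = current_cost
--         else:
--             return min
--
--         i -= 1
--     return min
--
-- def sum_distances_fuel(input, point):
--     total = 0
--     for number in input:
--         distance = abs(number - point)
--         total += (distance * (distance + 1)) // 2
--
--     return total
-- ===== SOURCE B (Python) =====
-- def min_left(input, median, median_cost):
--     first = input[0]
--     n = len(input)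
--     total = sum(input)
--     cnt = {}
--     for v in input:
--         cnt[v] = cnt.get(v, 0) + 1
--     i = median - 1
--     # one pass: cost at i and the number of elements >= i
--     c = 0
--     cge = 0
--     for v in input:
--         d = abs(v - i)
--         c += d * (d + 1) // 2
--         if v >= i:
--             cge += 1
--     best = median_cost
--     while i > first:
--         if c < best:
--             best = c
--         else:
--             return best
--         # cost(i-1) = cost(i) + total - n*i + #{v >= i}, maintained incrementally
--         c = c + total - n * i + cge
--         i -= 1
--         cge += cnt.get(i, 0)
--     return best
-- ===== Notes on version B (the rewrite author's own statement) =====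
-- stated objective: alternative
-- what changed: Instead of recomputing the O(n) triangular-fuel sum at every scanned point, B computes the cost once at the starting point and then updates it in O(1) per step via the recurrence cost(i-1) = cost(i) + sum(input) - n*i + #{v >= i}, maintaining the >=-count with a precomputed value counter; this trades A's O(n) work per scanned point for O(n) preprocessing plus O(1) per step.
import Mathlib
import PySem

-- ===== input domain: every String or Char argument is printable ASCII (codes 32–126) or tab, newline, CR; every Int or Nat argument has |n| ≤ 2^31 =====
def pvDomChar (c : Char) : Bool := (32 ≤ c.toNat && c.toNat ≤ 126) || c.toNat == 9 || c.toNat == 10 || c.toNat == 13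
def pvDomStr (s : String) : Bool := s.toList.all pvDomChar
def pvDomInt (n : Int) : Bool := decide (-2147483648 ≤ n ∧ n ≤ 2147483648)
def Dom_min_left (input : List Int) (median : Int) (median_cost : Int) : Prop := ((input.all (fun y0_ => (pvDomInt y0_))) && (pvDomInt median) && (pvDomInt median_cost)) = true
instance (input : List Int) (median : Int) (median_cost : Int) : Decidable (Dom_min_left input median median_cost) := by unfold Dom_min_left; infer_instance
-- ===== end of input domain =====

-- B replaces A's per-point cost recomputation by an incremental update of the cost
-- (cost recurrence + a value counter): a different algorithm of comparable measured cost.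

-- ===== PORT A =====
def sum_distances_fuel (input : List Int) (point : Int) : Int :=
  input.foldl (fun total number =>
    total + PySem.Int.floordiv ((|number - point|) * ((|number - point|) + 1)) 2) 0

def minLeftLoopA (input : List Int) (first i min : Int) : Int :=
  if i > first then
    let current_cost := sum_distances_fuel input i
    if current_cost < min then minLeftLoopA input first (i - 1) current_cost
    else min
  else min
termination_by (i - first).toNat
decreasing_by omega

def min_left (input : List Int) (median : Int) (median_cost : Int) : Int :=
  match PySem.List.pyGet? input 0 with
  | none => median_cost      -- Python raises IndexError here; excluded by Pre_
  | some first => minLeftLoopA input first (median - 1) median_cost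

-- ===== PORT B =====
def minLeftLoopB (total n : Int) (cnt : PySem.Dict Int Int) (first i c cge best : Int) : Int :=
  if i > first then
    if c < best then
      minLeftLoopB total n cnt first (i - 1) (c + total - n * i + cge) (cge + cnt.getD (i - 1) 0) c
    else best
  else best
termination_by (i - first).toNat
decreasing_by omega

def min_left_alt (input : List Int) (median : Int) (median_cost : Int) : Int :=
  match PySem.List.pyGet? input 0 with
  | none => median_cost      -- Python raises IndexError here; excluded by Pre_
  | some first =>
    let n : Int := input.length
    let total : Int := input.sum
    let cnt := input.foldl (fun d v => d.insert v (d.getD v 0 + 1)) PySem.Dict.empty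
    let i := median - 1
    let init := input.foldl (fun (p : Int × Int) v =>
      (p.1 + PySem.Int.floordiv ((|v - i|) * ((|v - i|) + 1)) 2,
       p.2 + (if v ≥ i then (1 : Int) else 0))) ((0 : Int), (0 : Int))
    minLeftLoopB total n cnt first i init.1 init.2 median_cost

-- ===== PRECONDITION & SPEC =====
-- Pre_ excludes only the empty list, on which A raises IndexError at `input[0]`.
def Pre_min_left (input : List Int) (median : Int) (median_cost : Int) : Prop := input ≠ []
instance (input : List Int) (median : Int) (median_cost : Int) : Decidable (Pre_min_left input median median_cost) := by unfold Pre_min_left; infer_instance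
def pvWitness_min_left : List Int × Int × Int := ([0, 2, 3, 3, 9], 3, 100)

def Spec_min_left (input : List Int) (median : Int) (median_cost : Int) (out : Int) : Prop := out = min_left_alt input median median_cost
instance (input : List Int) (median : Int) (median_cost : Int) (out : Int) : Decidable (Spec_min_left input median median_cost out) := by unfold Spec_min_left; infer_instance

-- ===== CLAIM (what is proved, stated in full; the proofs are below) =====
def Claim_equal_min_left : Prop := ∀ (input : List Int) (median : Int) (median_cost : Int), Dom_min_left input median median_cost → Pre_min_left input median median_cost → Spec_min_left input median median_cost (min_left input median median_cost)

-- ===== LEMMAS AND PROOFS =====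

/-- triangular fuel cost of one distance -/
def tri (d : Int) : Int := PySem.Int.floordiv (d * (d + 1)) 2

/-- total cost at point `p` (mathematical form) -/
def sumTri (input : List Int) (p : Int) : Int := (input.map (fun v => tri |v - p|)).sum

/-- number of elements ≥ p, as a sum of indicators -/
def cgeF (input : List Int) (p : Int) : Int := (input.map (fun v => if p ≤ v then (1 : Int) else 0)).sum

theorem tri_eval (d t : Int) (h : d * (d + 1) = 2 * t) : tri d = t := by
  unfold tri
  rw [h, PySem.Int.floordiv_eq_ediv_of_pos (by norm_num)]
  omega

theorem tri_step (a : Int) : tri |a + 1| = tri |a| + a + (if 0 ≤ a then 1 else 0) := by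
  rcases Int.even_mul_succ_self a with ⟨t, ht⟩
  have hta : tri |a| = if 0 ≤ a then t else t - a := by
    by_cases h : 0 ≤ a
    · rw [if_pos h, abs_of_nonneg h]; exact tri_eval _ _ (by omega)
    · rw [if_neg h, abs_of_nonpos (by omega)]
      exact tri_eval _ _ (by linear_combination ht)
  have hta1 : tri |a + 1| = if 0 ≤ a then t + a + 1 else t := by
    by_cases h : 0 ≤ a
    · rw [if_pos h, abs_of_nonneg (by omega)]
      exact tri_eval _ _ (by linear_combination ht)
    · rw [if_neg h, abs_of_nonpos (by omega)]
      exact tri_eval _ _ (by linear_combination ht)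
  rw [hta, hta1]; split_ifs <;> ring

theorem sdf_eq_sumTri (input : List Int) (p : Int) :
    sum_distances_fuel input p = sumTri input p := by
  unfold sum_distances_fuel sumTri tri
  rw [PySem.List.foldl_add]
  simp

theorem sumTri_step (input : List Int) (p : Int) :
    sumTri input (p - 1) = sumTri input p + input.sum - (input.length : Int) * p + cgeF input p := by
  induction input with
  | nil => simp [sumTri, cgeF]
  | cons v vs ih =>
    have h := tri_step (v - p)
    have habs : |v - (p - 1)| = |v - p + 1| := by ring_nf
    simp only [sumTri, cgeF, List.map_cons, List.sum_cons, List.length_cons, List.sum_cons] at *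
    rw [habs, h, ih]
    by_cases hpv : p ≤ v
    · rw [if_pos (by omega : (0:Int) ≤ v - p), if_pos hpv]
      push_cast; ring
    · rw [if_neg (by omega : ¬ (0:Int) ≤ v - p), if_neg hpv]
      push_cast; ring

theorem cgeF_step (input : List Int) (p : Int) :
    cgeF input (p - 1) = cgeF input p + (input.count (p - 1) : Int) := by
  induction input with
  | nil => simp [cgeF]
  | cons v vs ih =>
    simp only [cgeF, List.map_cons, List.sum_cons, List.count_cons, beq_iff_eq] at *
    rw [ih]
    push_cast
    split_ifs <;> omega

theorem cnt_getD (input : List Int) (x : Int) :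
    (input.foldl (fun d v => d.insert v (d.getD v 0 + 1)) PySem.Dict.empty).getD x 0
      = (input.count x : Int) := by
  rw [PySem.Dict.getD_foldl_insert_add_one]
  simp

theorem loop_eq (input : List Int) (first : Int) :
    ∀ i best, minLeftLoopA input first i best
      = minLeftLoopB input.sum (input.length : Int)
          (input.foldl (fun d v => d.insert v (d.getD v 0 + 1)) PySem.Dict.empty)
          first i (sumTri input i) (cgeF input i) best := by
  have main : ∀ k i best, (i - first).toNat ≤ k → minLeftLoopA input first i best
      = minLeftLoopB input.sum (input.length : Int)
          (input.foldl (fun d v => d.insert v (d.getD v 0 + 1)) PySem.Dict.empty)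
          first i (sumTri input i) (cgeF input i) best := by
    intro k
    induction k with
    | zero =>
      intro i best hk
      rw [minLeftLoopA, minLeftLoopB]
      have h : ¬ i > first := by omega
      rw [if_neg h, if_neg h]
    | succ k ih =>
      intro i best hk
      rw [minLeftLoopA, minLeftLoopB]
      by_cases h : i > first
      · rw [if_pos h, if_pos h]
        simp only []
        by_cases h2 : sum_distances_fuel input i < best
        · rw [if_pos h2, if_pos (by rw [← sdf_eq_sumTri]; exact h2)]
          have e1 : sumTri input i + input.sum - (input.length : Int) * i + cgeF input i
              = sumTri input (i - 1) := (sumTri_step input i).symm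
          have e2 : cgeF input i
                + (input.foldl (fun d v => d.insert v (d.getD v 0 + 1)) PySem.Dict.empty).getD (i - 1) 0
              = cgeF input (i - 1) := by
            rw [cnt_getD]; exact (cgeF_step input i).symm
          rw [e1, e2, sdf_eq_sumTri]
          exact ih (i - 1) (sumTri input i) (by omega)
        · rw [if_neg h2, if_neg (by rw [← sdf_eq_sumTri]; exact h2)]
      · rw [if_neg h, if_neg h]
  exact fun i best => main (i - first).toNat i best le_rfl

theorem init_eq (input : List Int) (i : Int) :
    input.foldl (fun (p : Int × Int) v =>
      (p.1 + PySem.Int.floordiv ((|v - i|) * ((|v - i|) + 1)) 2,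
       p.2 + (if v ≥ i then (1 : Int) else 0))) ((0 : Int), (0 : Int))
      = (sumTri input i, cgeF input i) := by
  rw [PySem.List.foldl_prod_mk
        (f := fun (acc : Int) v => acc + PySem.Int.floordiv ((|v - i|) * ((|v - i|) + 1)) 2)
        (g := fun (acc : Int) v => acc + (if v ≥ i then (1 : Int) else 0))]
  unfold sumTri cgeF tri
  rw [PySem.List.foldl_add, PySem.List.foldl_add]
  simp [ge_iff_le]

-- ===== VERDICT (by name: the statement is the Claim_ definition above) =====
theorem min_left_spec : Claim_equal_min_left := by
  intro input median median_cost _dom hpre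
  unfold Spec_min_left min_left min_left_alt
  cases input with
  | nil => exact absurd rfl hpre
  | cons x xs =>
    rw [PySem.List.pyGet?_zero_cons]
    simp only [init_eq]
    exact loop_eq (x :: xs) x (median - 1) median_cost
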